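-- pv_equiv track=rewrite | github.com/Nozidoali/quantum-xyz | xyz/algorithms/synthesis/_qubit_reduction.py | _get_rotation_supports
-- ===== SOURCE A (Python) =====
-- def _get_rotation_supports(index_to_theta: dict, num_lits: int, target_qubit: int):
--     lit_to_val = {}
--     supports = set()
--     for index, _ in index_to_theta.items():
--         for lit in range(num_lits):
--             if lit == target_qubit:
--                 continue
--             lit_val = (index >> lit) & 1
--             if lit not in lit_to_val:
--                 lit_to_val[lit] = lit_val
--             elif lit_to_val[lit] != lit_val:
--                 supports.add(lit)
--
--     return supports
-- ===== SOURCE B (Python) =====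
-- def _get_rotation_supports(index_to_theta: dict, num_lits: int, target_qubit: int):
--     # Bit-parallel: xor each index with the first one; only bits not yet seen
--     # can become new supports, so the per-lit scan runs only while new bits appear.
--     supports = []
--     first = None
--     seen = 0
--     for index in index_to_theta:
--         if first is None:
--             first = index
--         else:
--             new = (index ^ first) & ~seen
--             if new:
--                 for lit in range(num_lits):
--                     if lit != target_qubit and (new >> lit) & 1:
--                         supports.append(lit)
--                 seen |= new
--     return set(supports)
-- ===== Notes on version B (the rewrite author's own statement) =====
-- stated objective: faster
-- what changed: B XORs each index with the first index and masks with the already-seen difference bits, so the inner per-literal scan runs only when genuinely new differing bits appear (at most once per machine bit), instead of A's scan of all num_lits literals for every index.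
import Mathlib
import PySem

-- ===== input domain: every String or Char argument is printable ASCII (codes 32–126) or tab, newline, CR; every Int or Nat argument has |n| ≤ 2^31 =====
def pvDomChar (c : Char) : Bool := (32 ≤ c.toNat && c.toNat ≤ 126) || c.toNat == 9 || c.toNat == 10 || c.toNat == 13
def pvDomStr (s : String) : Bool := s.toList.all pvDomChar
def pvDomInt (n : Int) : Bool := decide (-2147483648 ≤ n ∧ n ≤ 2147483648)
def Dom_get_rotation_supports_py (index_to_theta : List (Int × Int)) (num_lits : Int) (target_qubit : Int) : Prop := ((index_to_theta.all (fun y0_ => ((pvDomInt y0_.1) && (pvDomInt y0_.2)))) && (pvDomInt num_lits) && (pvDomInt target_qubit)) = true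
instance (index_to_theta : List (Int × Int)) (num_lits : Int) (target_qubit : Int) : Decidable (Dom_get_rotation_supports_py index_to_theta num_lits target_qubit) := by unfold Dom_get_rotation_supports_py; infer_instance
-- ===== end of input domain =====

-- B replaces A's per-index scan of all literals by a bit-parallel pass: it XORs each index
-- with the first index, masks with the bits already seen, and only scans literals when new
-- differing bits appear; same returned elements in the same first-insertion order.


-- ===== PORT A =====
-- body of A's inner 'for lit in range(num_lits)' loop, for one index
def pyAStepLit (target_qubit index : Int) (st : PySem.Dict Int Int × PySem.Set Int) (lit : Int) :
    PySem.Dict Int Int × PySem.Set Int :=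
  if lit == target_qubit then st
  else
    let lit_val := PySem.Int.band (index >>> lit.toNat) 1
    match st.1.get? lit with
    | none => (st.1.insert lit lit_val, st.2)
    | some v => if v != lit_val then (st.1, PySem.Set.add st.2 lit) else st

def pyAInner (num_lits target_qubit index : Int)
    (st : PySem.Dict Int Int × PySem.Set Int) : PySem.Dict Int Int × PySem.Set Int :=
  (PySem.List.pyRange 0 num_lits 1).foldl (pyAStepLit target_qubit index) st

def get_rotation_supports_py (index_to_theta : List (Int × Int)) (num_lits : Int) (target_qubit : Int) : List Int :=
  (index_to_theta.foldl (fun st p => pyAInner num_lits target_qubit p.1 st)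
    (PySem.Dict.empty, PySem.Set.empty)).2

-- ===== PORT B =====
-- body of B's 'for lit in range(num_lits)' append loop
def pyBEmitLit (target_qubit new : Int) (acc : List Int) (lit : Int) : List Int :=
  if lit != target_qubit && (PySem.Int.band (new >>> lit.toNat) 1 != 0) then acc ++ [lit] else acc

def pyBEmit (num_lits target_qubit new : Int) (acc : List Int) : List Int :=
  (PySem.List.pyRange 0 num_lits 1).foldl (pyBEmitLit target_qubit new) acc

def pyBStep (num_lits target_qubit : Int) (st : Option Int × Int × List Int) (index : Int) :
    Option Int × Int × List Int :=
  match st.1 with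
  | none => (some index, st.2.1, st.2.2)
  | some first =>
    let new := PySem.Int.band (PySem.Int.bxor index first) (Int.not st.2.1)
    if new != 0 then (st.1, PySem.Int.bor st.2.1 new, pyBEmit num_lits target_qubit new st.2.2)
    else st

def get_rotation_supports_py_alt (index_to_theta : List (Int × Int)) (num_lits : Int) (target_qubit : Int) : List Int :=
  PySem.Set.ofList
    ((index_to_theta.foldl (fun st p => pyBStep num_lits target_qubit st p.1) (none, 0, [])).2.2)

-- ===== PRECONDITION & SPEC =====
def Spec_get_rotation_supports_py (index_to_theta : List (Int × Int)) (num_lits : Int) (target_qubit : Int) (out : List Int) : Prop := out = get_rotation_supports_py_alt index_to_theta num_lits target_qubit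
instance (index_to_theta : List (Int × Int)) (num_lits : Int) (target_qubit : Int) (out : List Int) : Decidable (Spec_get_rotation_supports_py index_to_theta num_lits target_qubit out) := by unfold Spec_get_rotation_supports_py; infer_instance

-- ===== CLAIM (what is proved, stated in full; the proofs are below) =====
def Claim_equal_get_rotation_supports_py : Prop := ∀ (index_to_theta : List (Int × Int)) (num_lits : Int) (target_qubit : Int), Dom_get_rotation_supports_py index_to_theta num_lits target_qubit → Spec_get_rotation_supports_py index_to_theta num_lits target_qubit (get_rotation_supports_py index_to_theta num_lits target_qubit)

-- ===== LEMMAS AND PROOFS =====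

-- '(index >> lit) & 1', the bit of index at (nonnegative) position lit
def pvBit (i lit : Int) : Int := PySem.Int.band (i >>> lit.toNat) 1

-- bridges from PySem's Python-exact bitwise ops to Mathlib's land/lor/xor/lnot
theorem pvNotEq (a : Int) : Int.not a = Int.lnot a := by cases a <;> rfl

theorem pvLdiffEq (m n : Nat) : Nat.ldiff m n = m - (m &&& n) := by
  have h : (m &&& n) + Nat.ldiff m n = m := by
    induction m using Nat.binaryRec generalizing n with
    | zero =>
      have h0 : Nat.ldiff 0 n = 0 := by
        apply Nat.eq_of_testBit_eq; intro k; simp [Nat.testBit_ldiff]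
      simp [h0]
    | bit a m ih =>
      rw [← Nat.bit_testBit_zero_shiftRight_one n, Nat.land_bit, Nat.ldiff_bit,
          Nat.bit_val, Nat.bit_val, Nat.bit_val]
      have := ih (n >>> 1)
      cases a <;> cases n.testBit 0 <;> simp <;> omega
  omega

theorem pvBandEq (a b : Int) : PySem.Int.band a b = Int.land a b := by
  cases a with
  | ofNat m =>
    cases b with
    | ofNat n => simp [PySem.Int.band, Int.land]
    | negSucc n =>
      have h1 : (-(Int.negSucc n) - 1) = (n : Int) := by simp [Int.negSucc_eq]
      simp [PySem.Int.band, Int.land, pvLdiffEq]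
  | negSucc m =>
    have h1 : (-(Int.negSucc m) - 1) = (m : Int) := by simp [Int.negSucc_eq]
    cases b with
    | ofNat n => simp [PySem.Int.band, Int.land, pvLdiffEq]
    | negSucc n =>
      have h2 : (-(Int.negSucc n) - 1) = (n : Int) := by simp [Int.negSucc_eq]
      simp [PySem.Int.band, Int.land, Int.negSucc_not_nonneg]
      rw [Int.negSucc_eq]; ring

theorem pvBxorEq (a b : Int) : PySem.Int.bxor a b = Int.xor a b := by
  cases a with
  | ofNat m =>
    cases b with
    | ofNat n => simp [PySem.Int.bxor, Int.xor]
    | negSucc n =>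
      have h2 : (-(Int.negSucc n) - 1) = (n : Int) := by simp [Int.negSucc_eq]
      simp [PySem.Int.bxor, Int.xor, Int.negSucc_not_nonneg]
      rw [Int.negSucc_eq]; ring
  | negSucc m =>
    have h1 : (-(Int.negSucc m) - 1) = (m : Int) := by simp [Int.negSucc_eq]
    cases b with
    | ofNat n =>
      simp [PySem.Int.bxor, Int.xor, Int.negSucc_not_nonneg]
      rw [Int.negSucc_eq]; ring
    | negSucc n =>
      have h2 : (-(Int.negSucc n) - 1) = (n : Int) := by simp [Int.negSucc_eq]
      simp [PySem.Int.bxor, Int.xor, Int.negSucc_not_nonneg]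

theorem pvBorEq (a b : Int) : PySem.Int.bor a b = Int.lor a b := by
  cases a with
  | ofNat m =>
    cases b with
    | ofNat n => simp [PySem.Int.bor, Int.lor]
    | negSucc n =>
      have h2 : (-(Int.negSucc n) - 1) = (n : Int) := by simp [Int.negSucc_eq]
      simp [PySem.Int.bor, Int.lor, Int.negSucc_not_nonneg, pvLdiffEq]
      rw [Int.negSucc_eq]; ring
  | negSucc m =>
    have h1 : (-(Int.negSucc m) - 1) = (m : Int) := by simp [Int.negSucc_eq]
    cases b with
    | ofNat n =>
      simp [PySem.Int.bor, Int.lor, Int.negSucc_not_nonneg, pvLdiffEq]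
      rw [Int.negSucc_eq]; ring
    | negSucc n =>
      have h2 : (-(Int.negSucc n) - 1) = (n : Int) := by simp [Int.negSucc_eq]
      simp [PySem.Int.bor, Int.lor, Int.negSucc_not_nonneg]
      rw [Int.negSucc_eq]; ring

theorem pvBandShiftOne (x : Int) (k : Nat) :
    PySem.Int.band (x >>> k) 1 = if x.testBit k then 1 else 0 := by
  cases x with
  | ofNat n =>
    have hs : (Int.ofNat n) >>> k = ((n >>> k : Nat) : Int) := rfl
    have ht : (Int.ofNat n).testBit k = n.testBit k := rfl
    rw [hs, ht, show (1:Int) = ((1:Nat):Int) from rfl, PySem.Int.band_natCast]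
    rw [Nat.and_one_is_mod, Nat.shiftRight_eq_div_pow, Nat.testBit_eq_decide_div_mod_eq]
    rcases Nat.mod_two_eq_zero_or_one (n / 2 ^ k) with h | h <;> simp [h]
  | negSucc n =>
    have hs : (Int.negSucc n) >>> k = Int.negSucc (n >>> k) := rfl
    have ht : (Int.negSucc n).testBit k = !(n.testBit k) := rfl
    have hfalse : ¬(0 ≤ Int.negSucc (n >>> k)) := by simp [Int.negSucc_not_nonneg]
    have h2 : (-(Int.negSucc (n >>> k)) - 1) = ((n >>> k : Nat) : Int) := by simp [Int.negSucc_eq]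
    rw [hs, ht]
    simp only [PySem.Int.band, if_neg hfalse, if_pos (by norm_num : (0:Int) ≤ 1), h2,
      Int.toNat_one, Int.toNat_natCast]
    rw [Nat.land_comm, Nat.and_one_is_mod, Nat.shiftRight_eq_div_pow,
      Nat.testBit_eq_decide_div_mod_eq]
    rcases Nat.mod_two_eq_zero_or_one (n / 2 ^ k) with h | h <;> simp [h]
theorem innerA_build (L : List Int) (tq i : Int) : ∀ (d : PySem.Dict Int Int) (s : PySem.Set Int),
    L.Nodup → (∀ l ∈ L, d.get? l = none) →
    L.foldl (pyAStepLit tq i) (d, s)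
      = (L.foldl (fun d lit => if lit == tq then d else d.insert lit (pvBit i lit)) d, s) := by
  induction L with
  | nil => intro d s _ _; rfl
  | cons lit L ih =>
    intro d s hnd hfresh
    rcases List.nodup_cons.mp hnd with ⟨hlit, hnd'⟩
    by_cases h : lit = tq
    · subst h
      simp only [List.foldl_cons, pyAStepLit, beq_self_eq_true, if_true]
      exact ih d s hnd' fun l hl => hfresh l (List.mem_cons_of_mem _ hl)
    · have hb : (lit == tq) = false := by simp [h]
      simp only [List.foldl_cons, pyAStepLit, hb, if_false, Bool.false_eq_true,
        hfresh lit (List.mem_cons_self)]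
      exact ih _ s hnd' fun l hl => by
        rw [PySem.Dict.get?_insert_of_ne _ _ (by rintro rfl; exact hlit hl)]
        exact hfresh l (List.mem_cons_of_mem _ hl)

theorem buildGet (L : List Int) (tq i : Int) : ∀ (d : PySem.Dict Int Int) (k : Int),
    (L.foldl (fun d lit => if lit == tq then d else d.insert lit (pvBit i lit)) d).get? k
      = if k ∈ L ∧ k ≠ tq then some (pvBit i k) else d.get? k := by
  induction L with
  | nil => intro d k; simp
  | cons lit L ih =>
    intro d k
    simp only [List.foldl_cons]
    by_cases h : lit = tq
    · have hb : (lit == tq) = true := by simp [h]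
      rw [hb, if_pos rfl, ih]
      by_cases hk1 : k ∈ L <;> by_cases hk2 : k = tq <;>
        simp [hk1, hk2, List.mem_cons, h]
    · have hb : (lit == tq) = false := by simp [h]
      rw [hb, if_neg (by simp), ih]
      simp only [PySem.Dict.get?_insert]
      by_cases hk1 : k ∈ L <;> by_cases hk2 : k = tq <;> by_cases hk3 : k = lit <;>
        simp [hk1, hk2, hk3, List.mem_cons, h] <;> tauto

-- A's supports-set update for one (index, lit) pair, once the dict is populated
def pvSStep (tq i0 i : Int) (s : PySem.Set Int) (lit : Int) : PySem.Set Int :=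
  if lit == tq then s
  else if pvBit i0 lit != pvBit i lit then PySem.Set.add s lit else s

def pvNew (i i0 seen : Int) : Int := PySem.Int.band (PySem.Int.bxor i i0) (Int.not seen)

theorem pvNewTestBit (i i0 seen : Int) (k : Nat) :
    (pvNew i i0 seen).testBit k = ((i.testBit k ^^ i0.testBit k) && !seen.testBit k) := by
  rw [pvNew, pvBandEq, pvBxorEq, pvNotEq, Int.testBit_land, Int.testBit_lxor, Int.testBit_lnot]

theorem pvBorTestBit (a b : Int) (k : Nat) :
    (PySem.Int.bor a b).testBit k = (a.testBit k || b.testBit k) := by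
  rw [pvBorEq, Int.testBit_lor]

theorem pvBitNe (i0 i k : Int) :
    (pvBit i0 k != pvBit i k) = (i0.testBit k.toNat ^^ i.testBit k.toNat) := by
  show (PySem.Int.band (i0 >>> k.toNat) 1 != PySem.Int.band (i >>> k.toNat) 1) = _
  rw [pvBandShiftOne, pvBandShiftOne]
  cases h0 : i0.testBit k.toNat <;> cases h1 : i.testBit k.toNat <;> simp

theorem pvEmitCond (new k : Int) :
    (PySem.Int.band (new >>> k.toNat) 1 != 0) = new.testBit k.toNat := by
  rw [pvBandShiftOne]
  cases h : new.testBit k.toNat <;> simp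

theorem pvZeroTestBit (k : Nat) : (0 : Int).testBit k = false := by
  show Nat.testBit 0 k = false
  simp

theorem innerA_steady (L : List Int) (tq i0 i : Int) (d : PySem.Dict Int Int) :
    ∀ (s : PySem.Set Int), (∀ l ∈ L, l ≠ tq → d.get? l = some (pvBit i0 l)) →
    L.foldl (pyAStepLit tq i) (d, s) = (d, L.foldl (pvSStep tq i0 i) s) := by
  induction L with
  | nil => intro s _; rfl
  | cons lit L ih =>
    intro s hd
    simp only [List.foldl_cons]
    by_cases h : lit = tq
    · have hb : (lit == tq) = true := by simp [h]
      rw [show pyAStepLit tq i (d, s) lit = (d, s) by simp [pyAStepLit, hb],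
          show pvSStep tq i0 i s lit = s by simp [pvSStep, hb]]
      exact ih s fun l hl => hd l (List.mem_cons_of_mem _ hl)
    · have hb : (lit == tq) = false := by simp [h]
      have hget := hd lit (List.mem_cons_self) h
      have hA : pyAStepLit tq i (d, s) lit = (d, pvSStep tq i0 i s lit) := by
        simp only [pyAStepLit, pvSStep, hb, Bool.false_eq_true, if_false, hget]
        by_cases hne : pvBit i0 lit = pvBit i lit
        · simp [pvBit] at hne
          simp [hne, pvBit]
        · have hb2 : (pvBit i0 lit != pvBit i lit) = true := by simpa using hne
          simp [pvBit] at hne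
          simp only [hb2, if_true]
          simp [hne, pvBit]
      rw [hA]
      exact ih _ fun l hl => hd l (List.mem_cons_of_mem _ hl)

theorem sfold_mem (L : List Int) (tq i0 i : Int) : ∀ (s : PySem.Set Int) (k : Int),
    (k ∈ L.foldl (pvSStep tq i0 i) s)
      ↔ k ∈ s ∨ (k ∈ L ∧ k ≠ tq ∧ pvBit i0 k ≠ pvBit i k) := by
  induction L with
  | nil => intro s k; simp
  | cons lit L ih =>
    intro s k
    simp only [List.foldl_cons, ih]
    constructor
    · rintro (hm | h)
      · unfold pvSStep at hm
        split_ifs at hm with h1 h2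
        · exact Or.inl hm
        · rcases (PySem.Set.mem_add _ _ _).mp hm with hm | rfl
          · exact Or.inl hm
          · exact Or.inr ⟨List.mem_cons_self, by simpa using h1, by simpa using h2⟩
        · exact Or.inl hm
      · exact Or.inr ⟨List.mem_cons_of_mem _ h.1, h.2⟩
    · rintro (hm | ⟨hmem, hne, hbit⟩)
      · left; unfold pvSStep
        split_ifs with h1 h2
        · exact hm
        · exact (PySem.Set.mem_add _ _ _).mpr (Or.inl hm)
        · exact hm
      · rcases List.mem_cons.mp hmem with rfl | hk
        · left
          unfold pvSStep
          rw [if_neg (by simp [hne]), if_pos (by simpa using hbit)]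
          exact (PySem.Set.mem_add _ _ _).mpr (Or.inr rfl)
        · exact Or.inr ⟨hk, hne, hbit⟩

theorem sfold_nodup (L : List Int) (tq i0 i : Int) : ∀ (s : PySem.Set Int),
    s.Nodup → (L.foldl (pvSStep tq i0 i) s).Nodup := by
  induction L with
  | nil => intro s h; exact h
  | cons lit L ih =>
    intro s h
    refine ih _ ?_
    unfold pvSStep
    split_ifs <;> first | exact h | exact PySem.Set.nodup_add _ _ h

theorem coupled (L : List Int) (tq i0 i seen : Int) : ∀ (s : PySem.Set Int),
    L.Nodup → (∀ l ∈ L, 0 ≤ l) →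
    (∀ l ∈ L, l ≠ tq → (l ∈ s ↔ seen.testBit l.toNat = true)) →
    L.foldl (pvSStep tq i0 i) s = L.foldl (pyBEmitLit tq (pvNew i i0 seen)) s := by
  induction L with
  | nil => intro s _ _ _; rfl
  | cons lit L ih =>
    intro s hnd hpos hseen
    rcases List.nodup_cons.mp hnd with ⟨hlit, hnd'⟩
    simp only [List.foldl_cons]
    have hstep : pvSStep tq i0 i s lit = pyBEmitLit tq (pvNew i i0 seen) s lit := by
      by_cases h : lit = tq
      · simp [pvSStep, pyBEmitLit, h]
      · have hb : (lit == tq) = false := by simp [h]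
        have hb' : (lit != tq) = true := by simp [h]
        rw [pvSStep, pyBEmitLit, if_neg (by simp [hb]), hb', Bool.true_and, pvEmitCond,
          pvNewTestBit, PySem.Set.add_eq_ite, pvBitNe]
        have hmem := hseen lit List.mem_cons_self h
        rcases Bool.eq_false_or_eq_true (seen.testBit lit.toNat) with hsb | hsb
        · have hms : lit ∈ s := hmem.mpr hsb
          rcases Bool.eq_false_or_eq_true (i0.testBit lit.toNat) with h0 | h0 <;>
            rcases Bool.eq_false_or_eq_true (i.testBit lit.toNat) with h1 | h1 <;>
              simp [h0, h1, hsb, hms]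
        · have hms : lit ∉ s := fun hm => by simp [hmem.mp hm] at hsb
          rcases Bool.eq_false_or_eq_true (i0.testBit lit.toNat) with h0 | h0 <;>
            rcases Bool.eq_false_or_eq_true (i.testBit lit.toNat) with h1 | h1 <;>
              simp [h0, h1, hsb, hms]
    rw [hstep]
    -- membership in the new accumulator is unchanged for the remaining (distinct) lits
    have hsub : ∀ l ∈ L, l ≠ tq →
        (l ∈ pyBEmitLit tq (pvNew i i0 seen) s lit ↔ seen.testBit l.toNat = true) := by
      intro l hl hltq
      have hne : l ≠ lit := by rintro rfl; exact hlit hl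
      unfold pyBEmitLit
      split_ifs with hc
      · rw [List.mem_append]
        simp only [List.mem_singleton, hne, or_false]
        exact hseen l (List.mem_cons_of_mem _ hl) hltq
      · exact hseen l (List.mem_cons_of_mem _ hl) hltq
    exact ih _ hnd' (fun l hl => hpos l (List.mem_cons_of_mem _ hl)) hsub

theorem pvBStepRun (nl tq i0 seen i : Int) (acc : List Int) :
    pyBStep nl tq (some i0, seen, acc) i
      = (some i0, PySem.Int.bor seen (pvNew i i0 seen), pyBEmit nl tq (pvNew i i0 seen) acc) := by
  show (let new := PySem.Int.band (PySem.Int.bxor i i0) (Int.not seen);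
        if new != 0 then (some i0, PySem.Int.bor seen new, pyBEmit nl tq new acc)
        else (some i0, seen, acc))
      = _
  by_cases h : pvNew i i0 seen = 0
  · have hb : (PySem.Int.band (PySem.Int.bxor i i0) (Int.not seen) != 0) = false := by
      simp [show PySem.Int.band (PySem.Int.bxor i i0) (Int.not seen) = pvNew i i0 seen from rfl, h]
    simp only [hb, Bool.false_eq_true, if_false, h]
    refine Prod.ext rfl (Prod.ext (by simp [PySem.Int.bor_zero]) ?_)
    show acc = pyBEmit nl tq 0 acc
    unfold pyBEmit
    rw [PySem.List.foldl_congr_mem _ _ (fun acc _ => acc) acc ?_, PySem.List.foldl_ignore]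
    intro a x hx
    unfold pyBEmitLit
    rw [pvEmitCond, pvZeroTestBit]
    simp
  · have hb : (PySem.Int.band (PySem.Int.bxor i i0) (Int.not seen) != 0) = true := by
      simp [show PySem.Int.band (PySem.Int.bxor i i0) (Int.not seen) = pvNew i i0 seen from rfl, h]
    simp only [hb, if_true]
    rfl

theorem pvLoopEq (l : List (Int × Int)) (nl tq i0 : Int) :
    ∀ (d : PySem.Dict Int Int) (s : PySem.Set Int) (seen : Int),
    (∀ k ∈ PySem.List.pyRange 0 nl 1, k ≠ tq → d.get? k = some (pvBit i0 k)) →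
    s.Nodup →
    (∀ k ∈ PySem.List.pyRange 0 nl 1, k ≠ tq → (k ∈ s ↔ seen.testBit k.toNat = true)) →
    (l.foldl (fun st p => pyAInner nl tq p.1 st) (d, s)).2
        = (l.foldl (fun st p => pyBStep nl tq st p.1) (some i0, seen, s)).2.2
      ∧ ((l.foldl (fun st p => pyAInner nl tq p.1 st) (d, s)).2).Nodup := by
  induction l with
  | nil => intro d s seen _ hnd _; exact ⟨rfl, hnd⟩
  | cons p l ih =>
    intro d s seen hd hnd hseen
    simp only [List.foldl_cons]
    rw [show pyAInner nl tq p.1 (d, s)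
          = (d, (PySem.List.pyRange 0 nl 1).foldl (pvSStep tq i0 p.1) s) from
        innerA_steady _ tq i0 p.1 d s (fun k hk hktq => hd k hk hktq),
      pvBStepRun]
    have hcoup := coupled (PySem.List.pyRange 0 nl 1) tq i0 p.1 seen s
      (PySem.List.nodup_pyRange_one 0 nl)
      (fun k hk => (PySem.List.mem_pyRange_one.mp hk).1)
      hseen
    rw [show pyBEmit nl tq (pvNew p.1 i0 seen) s
          = (PySem.List.pyRange 0 nl 1).foldl (pvSStep tq i0 p.1) s from (hcoup.symm ▸ rfl)]
    refine ih d _ _ hd (sfold_nodup _ tq i0 p.1 s hnd) ?_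
    intro k hk hktq
    rw [sfold_mem, pvBorTestBit, pvNewTestBit]
    rcases Bool.eq_false_or_eq_true (seen.testBit k.toNat) with hsb | hsb
    · have hms : k ∈ s := (hseen k hk hktq).mpr hsb
      simp [hms, hsb]
    · have hms : k ∉ s := fun hm => by simp [(hseen k hk hktq).mp hm] at hsb
      simp only [hsb, Bool.not_false, Bool.and_true, Bool.false_or]
      constructor
      · rintro (hm | ⟨_, _, hbit⟩)
        · exact absurd hm hms
        · have := pvBitNe i0 p.1 k
          rw [Bool.xor_comm] at this
          rw [← this]
          simpa using hbit
      · intro hx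
        refine Or.inr ⟨hk, hktq, ?_⟩
        have := pvBitNe i0 p.1 k
        rw [Bool.xor_comm] at this
        rw [← this] at hx
        simpa using hx

theorem pvMain (l : List (Int × Int)) (nl tq : Int) :
    get_rotation_supports_py l nl tq = get_rotation_supports_py_alt l nl tq := by
  cases l with
  | nil => rfl
  | cons p l =>
    unfold get_rotation_supports_py get_rotation_supports_py_alt
    simp only [List.foldl_cons]
    rw [show pyAInner nl tq p.1 (PySem.Dict.empty, PySem.Set.empty)
          = ((PySem.List.pyRange 0 nl 1).foldl
              (fun d lit => if lit == tq then d else d.insert lit (pvBit p.1 lit))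
              PySem.Dict.empty, PySem.Set.empty) from
        innerA_build _ tq p.1 _ _ (PySem.List.nodup_pyRange_one 0 nl)
          (fun k _ => PySem.Dict.get?_empty k),
      show pyBStep nl tq (none, 0, []) p.1 = (some p.1, 0, []) from rfl,
      show (PySem.Set.empty : PySem.Set Int) = ([] : List Int) from rfl]
    have hd : ∀ k ∈ PySem.List.pyRange 0 nl 1, k ≠ tq →
        ((PySem.List.pyRange 0 nl 1).foldl
          (fun d lit => if lit == tq then d else d.insert lit (pvBit p.1 lit))
          PySem.Dict.empty).get? k = some (pvBit p.1 k) := by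
      intro k hk hktq
      rw [buildGet, if_pos ⟨hk, hktq⟩]
    have hseen : ∀ k ∈ PySem.List.pyRange 0 nl 1, k ≠ tq →
        ((k ∈ ([] : List Int)) ↔ (0 : Int).testBit k.toNat = true) := by
      intro k _ _
      simp [pvZeroTestBit]
    obtain ⟨heq, hnd⟩ := pvLoopEq l nl tq p.1 _ ([] : List Int) 0 hd List.nodup_nil hseen
    rw [← heq, PySem.Set.ofList_eq_self_of_nodup _ hnd]

-- ===== VERDICT (by name: the statement is the Claim_ definition above) =====
theorem get_rotation_supports_py_spec : Claim_equal_get_rotation_supports_py := by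
  intro index_to_theta num_lits target_qubit _
  unfold Spec_get_rotation_supports_py
  exact pvMain index_to_theta num_lits target_qubit
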